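-- pv_equiv track=rewrite | github.com/capedbaldy82/coding-challenge | thisistest/Greedy/큰 수의 법칙.py | solution
-- ===== SOURCE A (Python) =====
-- def solution(rule, numbers):
--     answer=0
--     count=0
--
--     numbers.sort(reverse=True)
--
--     for i in range(0,8):
--         if count < rule[2]:
--             answer += numbers[0]
--             count += 1
--         else:
--             answer += numbers[1]
--             count=0
--
--     return answer
-- ===== SOURCE B (Python) =====
-- def solution(rule, numbers):
--     # Closed form instead of the 8-step loop; sorts numbers in place like A.
--     numbers.sort(reverse=True)
--     m = rule[2]
--     if m <= 0:
--         return 8 * numbers[1]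
--     q = 8 // (m + 1)
--     r = 8 % (m + 1)
--     answer = (q * m + r) * numbers[0]
--     if q > 0:
--         answer += q * numbers[1]
--     return answer
-- ===== Notes on version B (the rewrite author's own statement) =====
-- stated objective: simpler
-- what changed: Replaced A's fixed 8-iteration greedy loop with a closed-form formula: with m = rule[2], q = 8 // (m+1), r = 8 % (m+1), the answer is (q*m + r)*numbers[0] + q*numbers[1] (and 8*numbers[1] when m <= 0); guards keep IndexError parity.
import Mathlib
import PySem

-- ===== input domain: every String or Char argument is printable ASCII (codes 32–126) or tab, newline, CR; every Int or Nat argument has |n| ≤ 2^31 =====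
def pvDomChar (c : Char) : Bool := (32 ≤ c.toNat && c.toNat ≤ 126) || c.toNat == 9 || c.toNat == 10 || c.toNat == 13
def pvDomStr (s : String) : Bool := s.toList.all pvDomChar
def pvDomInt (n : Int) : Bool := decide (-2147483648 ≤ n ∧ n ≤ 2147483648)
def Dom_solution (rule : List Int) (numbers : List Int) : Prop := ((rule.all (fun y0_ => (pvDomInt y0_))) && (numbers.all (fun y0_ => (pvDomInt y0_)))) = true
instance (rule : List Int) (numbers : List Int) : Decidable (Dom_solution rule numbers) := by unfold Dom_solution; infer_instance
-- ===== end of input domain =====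

-- B replaces A's fixed 8-iteration greedy loop with a closed-form formula (simpler; same cost).
-- Both A and B sort `numbers` in place; the equivalence proved here is about the return value.


-- ===== PORT A =====
def solution (rule : List Int) (numbers : List Int) : Int :=
  let ns := PySem.List.sorted numbers (fun x => x) true
  let st := (PySem.List.pyRange 0 8 1).foldl
    (fun (ac : Int × Int) _i =>
      if ac.2 < PySem.List.pyGetD rule 2 0 then
        (ac.1 + PySem.List.pyGetD ns 0 0, ac.2 + 1)
      else
        (ac.1 + PySem.List.pyGetD ns 1 0, 0))
    ((0 : Int), (0 : Int))
  st.1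

-- ===== PORT B =====
def solution_alt (rule : List Int) (numbers : List Int) : Int :=
  let ns := PySem.List.sorted numbers (fun x => x) true
  let m := PySem.List.pyGetD rule 2 0
  if m ≤ 0 then 8 * PySem.List.pyGetD ns 1 0
  else
    let q := PySem.Int.floordiv 8 (m + 1)
    let r := PySem.Int.mod 8 (m + 1)
    let answer := (q * m + r) * PySem.List.pyGetD ns 0 0
    if 0 < q then answer + q * PySem.List.pyGetD ns 1 0 else answer

-- ===== PRECONDITION & SPEC =====
-- Pre_ excludes exactly the inputs where Python A raises IndexError: rule shorter than 3,
-- numbers empty, or numbers a singleton while rule[2] < 8 (then the else-branch reads numbers[1]).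
def Pre_solution (rule : List Int) (numbers : List Int) : Prop :=
  3 ≤ rule.length ∧ 1 ≤ numbers.length ∧ (rule.getD 2 0 < 8 → 2 ≤ numbers.length)
instance (rule : List Int) (numbers : List Int) : Decidable (Pre_solution rule numbers) := by unfold Pre_solution; infer_instance
def pvWitness_solution : List Int × List Int := ([2, 4, 3], [5, 1, 6])
def Spec_solution (rule : List Int) (numbers : List Int) (out : Int) : Prop := out = solution_alt rule numbers
instance (rule : List Int) (numbers : List Int) (out : Int) : Decidable (Spec_solution rule numbers out) := by unfold Spec_solution; infer_instance

-- ===== CLAIM (what is proved, stated in full; the proofs are below) =====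
def Claim_equal_solution : Prop := ∀ (rule : List Int) (numbers : List Int), Dom_solution rule numbers → Pre_solution rule numbers → Spec_solution rule numbers (solution rule numbers)

-- ===== LEMMAS AND PROOFS =====

lemma pyRange08 : PySem.List.pyRange 0 8 1 = [0, 1, 2, 3, 4, 5, 6, 7] := by decide

lemma loop_eq (m n0 n1 : Int) :
    (([0, 1, 2, 3, 4, 5, 6, 7] : List Int).foldl
      (fun (ac : Int × Int) _i =>
        if ac.2 < m then (ac.1 + n0, ac.2 + 1) else (ac.1 + n1, 0))
      ((0 : Int), (0 : Int))).1
    = if m ≤ 0 then 8 * n1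
      else
        let q := PySem.Int.floordiv 8 (m + 1)
        let r := PySem.Int.mod 8 (m + 1)
        let answer := (q * m + r) * n0
        if 0 < q then answer + q * n1 else answer := by
  by_cases h : m ≤ 0
  · simp [List.foldl, not_lt.mpr h, h]
    ring
  · by_cases h8 : m < 8
    · have h1 : 1 ≤ m := by omega
      interval_cases m <;> simp [List.foldl, PySem.Int.floordiv, PySem.Int.mod] <;> ring
    · have hq : PySem.Int.floordiv 8 (m + 1) = 0 := by
        rw [PySem.Int.floordiv_eq_iff_of_pos (by omega)]
        omega
      have hr : PySem.Int.mod 8 (m + 1) = 8 := by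
        have := PySem.Int.floordiv_mul_add_mod 8 (m + 1)
        rw [hq] at this; omega
      have c0 : ((0:Int) < m) = True := eq_true (by omega)
      have c1 : ((1:Int) < m) = True := eq_true (by omega)
      have c2 : ((2:Int) < m) = True := eq_true (by omega)
      have c3 : ((3:Int) < m) = True := eq_true (by omega)
      have c4 : ((4:Int) < m) = True := eq_true (by omega)
      have c5 : ((5:Int) < m) = True := eq_true (by omega)
      have c6 : ((6:Int) < m) = True := eq_true (by omega)
      have c7 : ((7:Int) < m) = True := eq_true (by omega)
      simp [List.foldl, c0, c1, c2, c3, c4, c5, c6, c7, hq, hr, not_le.mpr (show (0:Int) < m by omega)]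
      ring

-- ===== VERDICT (by name: the statement is the Claim_ definition above) =====
theorem solution_spec : Claim_equal_solution := by
  intro rule numbers _ _
  unfold Spec_solution solution solution_alt
  rw [pyRange08]
  exact loop_eq _ _ _
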